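-- pv_equiv track=rewrite | github.com/Hejow/Algorithm | ETC/0220코테 4번.py | solution
-- ===== SOURCE A (Python) =====
-- def solution(play_list, listen_time):
--     size = len(play_list)
--     max_ = 0
--
--     for i in range(size):
--         givenTime = listen_time
--         tmp = []
--         idx = i+1
--
--         tmp.append(i)
--         givenTime -= 1
--
--         while True:
--             if (idx % size) in tmp: return size
--
--             playTime = play_list[idx % size]
--             givenTime -= playTime
--             tmp.append((idx % size))
--             idx += 1
--
--             if givenTime <= 0: break
--
--         max_ = max(max_, len(tmp))
--
--     return max_
-- ===== SOURCE B (Python) =====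
-- def solution(play_list, listen_time):
--     size = len(play_list)
--     target = listen_time - 1
--     # prefix sums of the doubled playlist: prefix[j] = sum of first j songs of play_list+play_list
--     prefix = [0]
--     for t in play_list + play_list:
--         prefix.append(prefix[-1] + t)
--     best = 0
--     for i in range(size):
--         found = 0
--         for m in range(1, size):
--             if prefix[i + 1 + m] - prefix[i + 1] >= target:
--                 found = m + 1
--                 break
--         if found == 0:
--             return size
--         best = max(best, found)
--     return best
-- ===== Notes on version B (the rewrite author's own statement) =====
-- stated objective: alternative
-- what changed: B replaces A's per-start simulation with a visited list, a mutable time budget and an O(k) membership test per step by one precomputed prefix-sum array over the doubled playlist, an inner scan for the first threshold crossing, and wrap-around detected by scan exhaustion instead of revisit detection.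
import Mathlib
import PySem

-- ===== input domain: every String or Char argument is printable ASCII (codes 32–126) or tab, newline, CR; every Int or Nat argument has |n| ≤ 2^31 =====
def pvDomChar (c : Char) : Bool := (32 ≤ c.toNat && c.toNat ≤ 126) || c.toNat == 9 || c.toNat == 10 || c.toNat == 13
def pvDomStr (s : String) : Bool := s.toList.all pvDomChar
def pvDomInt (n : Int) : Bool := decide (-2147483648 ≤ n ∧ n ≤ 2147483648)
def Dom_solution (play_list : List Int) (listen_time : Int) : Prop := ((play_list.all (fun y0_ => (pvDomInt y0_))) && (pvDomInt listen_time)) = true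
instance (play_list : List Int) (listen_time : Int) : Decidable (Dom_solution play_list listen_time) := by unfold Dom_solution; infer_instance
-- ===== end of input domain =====

-- B replaces A's per-start visited-list simulation by prefix sums over the doubled
-- playlist with an inner threshold scan (objective: alternative; no visited list, no per-step membership scan).

-- ===== PORT A =====
-- inner 'while True' loop; fuel is an upper bound on iterations (the loop revisits a
-- residue after at most size steps); Sum.inl = the 'return size' early exit,
-- Sum.inr = 'break' with len(tmp).  pl[idx % size] is always in range (0 ≤ r < size),
-- so pyGetD with default 0 is exact here.
def solInnerA (pl : List Int) (size : Int) : Nat → Int → List Int → Int → (Int ⊕ Int)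
  | 0, _, tmp, _ => Sum.inr ((tmp.length : Int))       -- fuel exhausted: never reached
  | fuel+1, givenTime, tmp, idx =>
      let r := PySem.Int.mod idx size
      if tmp.contains r then Sum.inl size
      else
        let playTime := PySem.List.pyGetD pl r 0
        let givenTime' := givenTime - playTime
        let tmp' := tmp ++ [r]
        let idx' := idx + 1
        if givenTime' ≤ 0 then Sum.inr ((tmp'.length : Int))
        else solInnerA pl size fuel givenTime' tmp' idx'

def solOuterA (pl : List Int) (size listen_time : Int) : List Int → Int → Int
  | [], max_ => max_
  | i :: rest, max_ =>
      match solInnerA pl size (size.toNat + 1) (listen_time - 1) [i] (i + 1) with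
      | Sum.inl v => v
      | Sum.inr len => solOuterA pl size listen_time rest (max max_ len)

def solution (play_list : List Int) (listen_time : Int) : Int :=
  let size : Int := play_list.length
  solOuterA play_list size listen_time (PySem.List.pyRange 0 size 1) 0

-- ===== PORT B =====
-- prefix = [0]; for t in play_list+play_list: prefix.append(prefix[-1] + t)
def solPrefixB (l : List Int) : List Int :=
  l.foldl (fun acc t => acc ++ [PySem.List.pyGetD acc (-1) 0 + t]) [0]

-- the inner 'for m in range(1, size)' with break; 0 = no crossing found
def solInnerB (pre : List Int) (i target : Int) : List Int → Int
  | [] => 0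
  | m :: rest =>
      if PySem.List.pyGetD pre (i + 1 + m) 0 - PySem.List.pyGetD pre (i + 1) 0 ≥ target
      then m + 1 else solInnerB pre i target rest

def solOuterB (pre : List Int) (size target : Int) : List Int → Int → Int
  | [], best => best
  | i :: rest, best =>
      let found := solInnerB pre i target (PySem.List.pyRange 1 size 1)
      if found = 0 then size
      else solOuterB pre size target rest (max best found)

def solution_alt (play_list : List Int) (listen_time : Int) : Int :=
  let size : Int := play_list.length
  let target := listen_time - 1
  let pre := solPrefixB (play_list ++ play_list)
  solOuterB pre size target (PySem.List.pyRange 0 size 1) 0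

-- ===== PRECONDITION & SPEC =====
def Spec_solution (play_list : List Int) (listen_time : Int) (out : Int) : Prop := out = solution_alt play_list listen_time
instance (play_list : List Int) (listen_time : Int) (out : Int) : Decidable (Spec_solution play_list listen_time out) := by unfold Spec_solution; infer_instance

-- ===== CLAIM (what is proved, stated in full; the proofs are below) =====
def Claim_equal_solution : Prop := ∀ (play_list : List Int) (listen_time : Int), Dom_solution play_list listen_time → Spec_solution play_list listen_time (solution play_list listen_time)

-- ===== LEMMAS AND PROOFS =====

-- running sum of the m songs after start i (indices mod size)
def segS (pl : List Int) (i : Int) (m : Nat) : Int :=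
  ((List.range m).map (fun (k : Nat) => PySem.List.pyGetD pl ((i + 1 + (k : Int)) % (pl.length : Int)) 0)).sum

-- prefix sums as a pure list
def psums (x : Int) : List Int → List Int
  | [] => [x]
  | t :: rest => x :: psums (x + t) rest

lemma foldl_step_psums (l : List Int) : ∀ (acc : List Int) (x : Int),
    l.foldl (fun acc t => acc ++ [PySem.List.pyGetD acc (-1) 0 + t]) (acc ++ [x])
      = acc ++ psums x l := by
  induction l with
  | nil => intro acc x; simp [psums]
  | cons t rest ih =>
      intro acc x
      simp only [List.foldl_cons, PySem.List.pyGetD_neg_one_append_singleton, psums]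
      have h := ih (acc ++ [x]) (x + t)
      simpa [List.append_assoc] using h

lemma solPrefixB_eq (l : List Int) : solPrefixB l = psums 0 l := by
  have h := foldl_step_psums l [] 0
  simpa [solPrefixB] using h

lemma psums_getD (l : List Int) : ∀ (x : Int) (j : Nat), j ≤ l.length →
    (psums x l).getD j 0 = x + (l.take j).sum := by
  induction l with
  | nil =>
      intro x j hj
      have : j = 0 := by simpa using hj
      subst this; simp [psums]
  | cons t rest ih =>
      intro x j hj
      cases j with
      | zero => simp [psums]
      | succ j' =>
          simp only [psums, List.getD_cons_succ, List.take_succ_cons, List.sum_cons]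
          rw [ih (x + t) j' (by simpa using hj)]
          ring

lemma take_sum_sub (l : List Int) : ∀ (m i : Nat), i + m ≤ l.length →
    (l.take (i + m)).sum - (l.take i).sum
      = ((List.range m).map (fun (k : Nat) => l.getD (i + k) 0)).sum := by
  intro m
  induction m with
  | zero => intro i h; simp
  | succ m' ih =>
      intro i h
      have hi : i + m' < l.length := by omega
      have : l.take (i + (m' + 1)) = l.take (i + m') ++ [l[i + m']] := by
        have : i + (m' + 1) = (i + m') + 1 := by omega
        rw [this, List.take_add_one, List.getElem?_eq_getElem hi]
        simp
      rw [this, List.sum_append, List.range_succ, List.map_append]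
      have := ih i (by omega)
      simp only [List.map_cons, List.map_nil, List.sum_cons, List.sum_append, List.sum_nil]
      rw [← this]
      have : l.getD (i + m') 0 = l[i + m'] := List.getD_eq_getElem l 0 hi
      rw [this]; ring

-- elements of the doubled list reduce mod size
lemma doubled_getD (pl : List Int) (j : Nat) (hj : j < 2 * pl.length) :
    (pl ++ pl).getD j 0 = pl.getD (j % pl.length) 0 := by
  rcases Nat.lt_or_ge j pl.length with h | h
  · rw [Nat.mod_eq_of_lt h]
    rw [List.getD_eq_getElem _ _ (by simp; omega), List.getD_eq_getElem _ _ h]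
    rw [List.getElem_append_left h]
  · have hlen : 0 < pl.length := by omega
    have hsub : j - pl.length < pl.length := by omega
    have hmod : j % pl.length = j - pl.length := by
      rw [Nat.mod_eq_sub_mod h, Nat.mod_eq_of_lt hsub]
    rw [hmod, List.getD_eq_getElem _ _ (by simp; omega), List.getD_eq_getElem _ _ hsub]
    rw [List.getElem_append_right h]

-- the prefix-sum difference taken by B equals segS
lemma prefix_diff_eq_segS (pl : List Int) (i : Int) (m : Nat)
    (hi : 0 ≤ i) (his : i < (pl.length : Int)) (hm : (m : Int) ≤ (pl.length : Int)) :
    PySem.List.pyGetD (solPrefixB (pl ++ pl)) (i + 1 + (m : Int)) 0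
      - PySem.List.pyGetD (solPrefixB (pl ++ pl)) (i + 1) 0 = segS pl i m := by
  obtain ⟨a, rfl⟩ : ∃ a : Nat, i = (a : Int) := ⟨i.toNat, (Int.toNat_of_nonneg hi).symm⟩
  have ha : a < pl.length := by exact_mod_cast his
  have hm' : m ≤ pl.length := by exact_mod_cast hm
  rw [solPrefixB_eq]
  have h1 : (a : Int) + 1 + (m : Int) = ((a + 1 + m : Nat) : Int) := by push_cast; ring
  have h2 : (a : Int) + 1 = ((a + 1 : Nat) : Int) := by push_cast; ring
  rw [h1, h2, PySem.List.pyGetD_natCast, PySem.List.pyGetD_natCast]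
  rw [psums_getD _ _ _ (by simp; omega), psums_getD _ _ _ (by simp; omega)]
  have hseg := take_sum_sub (pl ++ pl) m (a + 1) (by simp; omega)
  have : (0 : Int) + ((pl ++ pl).take (a + 1 + m)).sum - (0 + ((pl ++ pl).take (a + 1)).sum)
      = ((pl ++ pl).take ((a + 1) + m)).sum - ((pl ++ pl).take (a + 1)).sum := by ring_nf
  rw [this, hseg]
  unfold segS
  refine congrArg List.sum (List.map_congr_left ?_)
  intro k hk
  have hk' : k < m := List.mem_range.mp hk
  rw [doubled_getD _ _ (by omega)]
  have hcast : ((a : Int) + 1 + (k : Int)) % ((pl.length : Nat) : Int)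
      = (((a + 1 + k) % pl.length : Nat) : Int) := by push_cast; ring_nf
  rw [hcast, PySem.List.pyGetD_natCast]

-- distinct residues: no revisit while m < size-1 …
lemma tmp_not_mem (i s : Int) (m : Nat) (hi : 0 ≤ i) (his : i < s)
    (hm : (m : Int) < s - 1) :
    (((List.range (m + 1)).map (fun (k : Nat) => (i + (k : Int)) % s)).contains
        ((i + 1 + (m : Int)) % s)) = false := by
  simp only [List.contains_eq_mem, List.mem_map, List.mem_range, decide_eq_false_iff_not,
    not_exists, not_and]
  intro k hk hkeq
  have hs : 0 < s := by omega
  have hdvd : s ∣ (i + 1 + (m : Int)) - (i + (k : Int)) := by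
    have h0 : ((i + 1 + (m : Int)) - (i + (k : Int))) % s = 0 := by
      rw [Int.sub_emod, hkeq, sub_self, Int.zero_emod]
    exact Int.dvd_of_emod_eq_zero h0
  have hk' : k < m + 1 := hk
  have hpos : 0 < (i + 1 + (m : Int)) - (i + (k : Int)) := by omega
  have := Int.le_of_dvd hpos hdvd
  push_cast at this
  omega

-- … and a revisit exactly at m = size-1
lemma tmp_mem_last (i s : Int) (m : Nat) (hi : 0 ≤ i) (his : i < s)
    (hm : (m : Int) = s - 1) :
    (((List.range (m + 1)).map (fun (k : Nat) => (i + (k : Int)) % s)).contains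
        ((i + 1 + (m : Int)) % s)) = true := by
  have hs : 0 < s := by omega
  have h1 : (i + 1 + (m : Int)) % s = i % s := by
    rw [hm]
    have : i + 1 + (s - 1) = i + s := by ring
    rw [this, Int.add_emod_right]
  have h2 : i % s = i := Int.emod_eq_of_lt hi his
  simp only [List.contains_eq_mem, List.mem_map, List.mem_range, decide_eq_true_eq]
  exact ⟨0, Nat.succ_pos m, by rw [Int.natCast_zero, add_zero, h2]; exact (h1.trans h2).symm⟩

-- segS grows one song at a time
lemma segS_succ (pl : List Int) (i : Int) (m : Nat) :
    segS pl i (m + 1)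
      = segS pl i m + PySem.List.pyGetD pl ((i + 1 + (m : Int)) % (pl.length : Int)) 0 := by
  unfold segS
  rw [List.range_succ, List.map_append, List.sum_append]
  simp

-- the two inner loops correspond
lemma inner_corr (pl : List Int) (lt i : Int)
    (hi : 0 ≤ i) (his : i < (pl.length : Int)) :
    ∀ (k : Nat) (m : Nat) (fuel : Nat), (m : Int) + (k : Int) = (pl.length : Int) - 1 →
      k + 1 ≤ fuel →
      (solInnerA pl (pl.length : Int) fuel ((lt - 1) - segS pl i m)
          ((List.range (m + 1)).map (fun (j : Nat) => (i + (j : Int)) % (pl.length : Int)))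
          (i + 1 + (m : Int))
        = (if solInnerB (solPrefixB (pl ++ pl)) i (lt - 1)
              (PySem.List.pyRange (1 + (m : Int)) (pl.length : Int) 1) = 0
           then Sum.inl (pl.length : Int)
           else Sum.inr (solInnerB (solPrefixB (pl ++ pl)) i (lt - 1)
              (PySem.List.pyRange (1 + (m : Int)) (pl.length : Int) 1)))) := by
  intro k
  induction k with
  | zero =>
      intro m fuel hm hfuel
      obtain ⟨f, rfl⟩ : ∃ f, fuel = f + 1 := ⟨fuel - 1, by omega⟩
      have hs : 0 < (pl.length : Int) := by omega
      have hB : PySem.List.pyRange (1 + (m : Int)) (pl.length : Int) 1 = [] := by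
        rw [PySem.List.pyRange_one]
        have : ((pl.length : Int) - (1 + (m : Int))).toNat = 0 := by omega
        rw [this]; simp
      rw [hB]
      simp only [solInnerA, solInnerB]
      rw [PySem.Int.mod_eq_emod_of_pos hs,
        tmp_mem_last i (pl.length : Int) m hi his (by omega)]
      simp
  | succ k ih =>
      intro m fuel hm hfuel
      obtain ⟨f, rfl⟩ : ∃ f, fuel = f + 1 := ⟨fuel - 1, by omega⟩
      have hs : 0 < (pl.length : Int) := by omega
      have hmlt : (m : Int) < (pl.length : Int) - 1 := by omega
      -- A side: membership test fails, one step is taken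
      rw [solInnerA, PySem.Int.mod_eq_emod_of_pos hs,
        tmp_not_mem i (pl.length : Int) m hi his hmlt]
      simp only [Bool.false_eq_true, if_false]
      -- B side: the range is nonempty, one step is taken
      have hcons : PySem.List.pyRange (1 + (m : Int)) (pl.length : Int) 1
          = (1 + (m : Int)) :: PySem.List.pyRange (1 + (m : Int) + 1) (pl.length : Int) 1 :=
        PySem.List.pyRange_one_cons (by omega)
      rw [hcons, solInnerB]
      have hdiff : PySem.List.pyGetD (solPrefixB (pl ++ pl)) (i + 1 + (1 + (m : Int))) 0
          - PySem.List.pyGetD (solPrefixB (pl ++ pl)) (i + 1) 0 = segS pl i (m + 1) := by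
        have h1 : i + 1 + (1 + (m : Int)) = i + 1 + ((m + 1 : Nat) : Int) := by push_cast; ring
        rw [h1]
        exact prefix_diff_eq_segS pl i (m + 1) hi his (by push_cast; omega)
      rw [hdiff]
      -- the two step conditions are the same inequality
      have hstate : lt - 1 - segS pl i m - PySem.List.pyGetD pl
            ((i + 1 + (m : Int)) % (pl.length : Int)) 0 = lt - 1 - segS pl i (m + 1) := by
        rw [segS_succ]; ring
      have htmp : (List.range (m + 1)).map
            (fun (j : Nat) => (i + (j : Int)) % (pl.length : Int))
            ++ [(i + 1 + (m : Int)) % (pl.length : Int)]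
          = (List.range (m + 1 + 1)).map
            (fun (j : Nat) => (i + (j : Int)) % (pl.length : Int)) := by
        rw [List.range_succ (n := m + 1), List.map_append]
        simp only [List.map_cons, List.map_nil]
        have : i + ((m + 1 : Nat) : Int) = i + 1 + (m : Int) := by push_cast; ring
        rw [this]
      simp only [hstate, htmp]
      by_cases hc : lt - 1 - segS pl i (m + 1) ≤ 0
      · rw [if_pos hc, if_pos (by omega : segS pl i (m + 1) ≥ lt - 1)]
        have hne : (1 + (m : Int)) + 1 ≠ 0 := by omega
        rw [if_neg hne]
        have hlen : (((List.range (m + 1 + 1)).map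
            (fun (j : Nat) => (i + (j : Int)) % (pl.length : Int))).length : Int)
            = 1 + (m : Int) + 1 := by
          simp [List.length_map, List.length_range]; ring
        rw [hlen]
      · rw [if_neg hc, if_neg (by omega : ¬ segS pl i (m + 1) ≥ lt - 1)]
        have hidx : i + 1 + (m : Int) + 1 = i + 1 + ((m + 1 : Nat) : Int) := by push_cast; ring
        have hrng : 1 + (m : Int) + 1 = 1 + ((m + 1 : Nat) : Int) := by push_cast; ring
        rw [hidx, hrng]
        exact ih (m + 1) f (by push_cast; omega) (by omega)

-- the two outer loops correspond
lemma outer_corr (pl : List Int) (lt : Int) :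
    ∀ (L : List Int), (∀ i ∈ L, 0 ≤ i ∧ i < (pl.length : Int)) → ∀ (acc : Int),
      solOuterA pl (pl.length : Int) lt L acc
        = solOuterB (solPrefixB (pl ++ pl)) (pl.length : Int) (lt - 1) L acc := by
  intro L
  induction L with
  | nil => intro _ acc; rfl
  | cons i rest ih =>
      intro hL acc
      obtain ⟨hi, his⟩ := hL i (List.mem_cons_self)
      have hs : 0 < (pl.length : Int) := by omega
      have hk : (((0 : Nat)) : Int) + ((((pl.length : Int) - 1).toNat : Nat) : Int)
          = (pl.length : Int) - 1 := by push_cast; omega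
      have hinner := inner_corr pl lt i hi his ((pl.length : Int) - 1).toNat 0
        ((pl.length : Int).toNat + 1) hk (by omega)
      rw [show lt - 1 - segS pl i 0 = lt - 1 from by simp [segS]] at hinner
      rw [show (List.range (0 + 1)).map
          (fun (j : Nat) => (i + (j : Int)) % (pl.length : Int)) = [i] from by
        simp [Int.emod_eq_of_lt hi his]] at hinner
      rw [show i + 1 + ((0 : Nat) : Int) = i + 1 from by simp] at hinner
      rw [show (1 + ((0 : Nat) : Int)) = (1 : Int) from by simp] at hinner
      rw [solOuterA, solOuterB, hinner]
      by_cases hz : solInnerB (solPrefixB (pl ++ pl)) i (lt - 1)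
          (PySem.List.pyRange 1 (pl.length : Int) 1) = 0
      · rw [if_pos hz, if_pos hz]
      · rw [if_neg hz, if_neg hz]
        exact ih (fun j hj => hL j (List.mem_cons_of_mem i hj)) _

-- ===== VERDICT (by name: the statement is the Claim_ definition above) =====
theorem solution_spec : Claim_equal_solution := by
  intro pl lt _
  unfold Spec_solution solution solution_alt
  exact outer_corr pl lt _ (by
    intro i hi
    have := (PySem.List.mem_pyRange_one).1 hi
    exact ⟨this.1, this.2⟩) 0
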